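-- pv_equiv track=rewrite | github.com/screnary/Algorithm_python | 1062_longestRepeatSubstr.py | __check
-- ===== SOURCE A (Python) =====
-- def __check(S, L):
--     """search a substring of given length
--         that occurs at least 2 times
--     if exists, return start position;
--     if not, return -1
--     """
--     seen = set()
--     n = len(S)
--     for i in range(n - L + 1):
--         tmp = S[i : i+L]
--         if tmp in seen:
--             return i
--         seen.add(tmp)
--     return -1
-- ===== SOURCE B (Python) =====
-- # Rabin-Karp: rolling polynomial hash mod a 61-bit prime per window, bucketed by hash
-- # with substring verification on hash hits -- expected O(n) vs A's O(n*L) set of copies.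
-- MOD = (1 << 61) - 1
-- BASE = 0x110000
--
-- def __check(S, L):
--     n = len(S)
--     m = n - L + 1  # number of windows of length L
--     if m <= 0:
--         return -1
--     shift = pow(BASE, L, MOD)
--     h = 0
--     for ch in S[:L]:
--         h = (h * BASE + ord(ch)) % MOD
--     buckets = {}
--     for i in range(m):
--         for j in buckets.get(h, ()):
--             if S[j:j+L] == S[i:i+L]:
--                 return i
--         buckets.setdefault(h, []).append(i)
--         if i + 1 < m:
--             h = (h * BASE + ord(S[i + L]) - ord(S[i]) * shift) % MOD
--     return -1
-- ===== Notes on version B (the rewrite author's own statement) =====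
-- stated objective: faster
-- what changed: Instead of storing every length-L substring copy in a set, B runs Rabin-Karp: a rolling polynomial hash mod a 61-bit prime per window, bucketed by hash with substring comparison only on hash hits.
-- outside the precondition, e.g. on __check('abc', -1): A returns 2, B raises IndexError
import Mathlib
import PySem

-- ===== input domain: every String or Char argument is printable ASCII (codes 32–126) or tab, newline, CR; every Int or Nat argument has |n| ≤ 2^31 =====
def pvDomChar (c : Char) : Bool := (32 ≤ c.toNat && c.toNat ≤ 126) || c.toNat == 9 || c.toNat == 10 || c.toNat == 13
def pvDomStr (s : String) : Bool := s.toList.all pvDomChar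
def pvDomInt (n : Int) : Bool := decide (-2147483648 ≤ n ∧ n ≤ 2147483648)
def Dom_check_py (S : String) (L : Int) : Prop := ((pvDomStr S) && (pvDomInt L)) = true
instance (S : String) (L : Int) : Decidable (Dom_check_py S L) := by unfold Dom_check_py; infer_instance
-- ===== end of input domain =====

-- B replaces A's set of substring copies by a Rabin–Karp scan: one rolling polynomial
-- hash mod a prime per window, bucketed by hash, with substring comparison on hash hits.

-- ===== PORT A =====
-- Python's set of substrings is modelled as a PySem.Set of the substrings' char lists
-- (string equality is char-list equality).
def checkALoop (s : List Char) (L : Int) (seen : PySem.Set (List Char)) (i : Nat) : Nat → Int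
  | 0 => -1
  | Nat.succ c =>
    let tmp := PySem.List.slice s (some (i : Int)) (some ((i : Int) + L))
    if PySem.Set.contains seen tmp then (i : Int)
    else checkALoop s L (PySem.Set.add seen tmp) (i + 1) c

def check_py (S : String) (L : Int) : Int :=
  let s := S.toList
  checkALoop s L PySem.Set.empty 0 (((s.length : Int) - L + 1).toNat)

-- ===== PORT B =====
def pvBASE : Int := 1114112
def pvMOD : Int := 2305843009213693951

-- one loop step per window; the inner `for j in buckets.get(h, ())` with its early
-- `return i` is the `.any` test; `0 < c` is Source B's `i + 1 < m` (more windows remain),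
-- under which both pyGetD indices are in range.
def checkBLoop (s : List Char) (L : Int) (shift : Int)
    (buckets : PySem.Dict Int (List Int)) (h : Int) (i : Nat) : Nat → Int
  | 0 => -1
  | Nat.succ c =>
    if (PySem.Dict.getD buckets h []).any (fun j =>
        PySem.List.slice s (some j) (some (j + L))
          == PySem.List.slice s (some (i : Int)) (some ((i : Int) + L))) then (i : Int)
    else
      let buckets' := PySem.Dict.insert buckets h (PySem.Dict.getD buckets h [] ++ [(i : Int)])
      let h' := if 0 < c then
          PySem.Int.mod (h * pvBASE + ((PySem.List.pyGetD s ((i : Int) + L) 'A').toNat : Int)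
            - ((PySem.List.pyGetD s (i : Int) 'A').toNat : Int) * shift) pvMOD
        else h
      checkBLoop s L shift buckets' h' (i + 1) c

def check_py_alt (S : String) (L : Int) : Int :=
  let s := S.toList
  let m : Int := (s.length : Int) - L + 1
  if m ≤ 0 then -1
  else
    let shift := PySem.Int.powMod pvBASE L.toNat pvMOD
    let h0 := (PySem.List.slice s none (some L)).foldl
      (fun a c => PySem.Int.mod (a * pvBASE + (c.toNat : Int)) pvMOD) 0
    checkBLoop s L shift PySem.Dict.empty h0 0 m.toNat

-- ===== PRECONDITION & SPEC =====
-- Pre_ excludes negative L (not a substring length): there A's windows arise from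
-- Python's negative-slice wraparound while B's rolling scan raises IndexError.
def Pre_check_py (S : String) (L : Int) : Prop := 0 ≤ L
instance (S : String) (L : Int) : Decidable (Pre_check_py S L) := by
  unfold Pre_check_py; infer_instance

def pvWitness_check_py : String × Int := ("abab", 2)

def Spec_check_py (S : String) (L : Int) (out : Int) : Prop := out = check_py_alt S L
instance (S : String) (L : Int) (out : Int) : Decidable (Spec_check_py S L out) := by
  unfold Spec_check_py; infer_instance

-- ===== CLAIM (what is proved, stated in full; the proofs are below) =====
def Claim_equal_check_py : Prop :=
  ∀ (S : String) (L : Int), Dom_check_py S L → Pre_check_py S L →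
    Spec_check_py S L (check_py S L)

-- ===== LEMMAS AND PROOFS =====

-- the window of length Ln starting at j, its exact base-pvBASE code, its hash, and
-- the bucket contents after i windows have been recorded
def pvWin (s : List Char) (Ln j : Nat) : List Char := (s.drop j).take Ln
def pvEnc (cs : List Char) : Int := cs.foldl (fun a c => a * pvBASE + (c.toNat : Int)) 0
def pvHsh (s : List Char) (Ln j : Nat) : Int := pvEnc (pvWin s Ln j) % pvMOD
def pvIdx (s : List Char) (Ln i : Nat) (x : Int) : List Int :=
  ((List.range i).filter (fun j => pvHsh s Ln j == x)).map Int.ofNat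

theorem pvMOD_pos : (0 : Int) < pvMOD := by norm_num [pvMOD]

theorem pvEnc_foldl (cs : List Char) (a : Int) :
    cs.foldl (fun a c => a * pvBASE + (c.toNat : Int)) a
      = a * pvBASE ^ cs.length + pvEnc cs := by
  induction cs generalizing a with
  | nil => simp [pvEnc]
  | cons c cs ih =>
    have hc : pvEnc (c :: cs)
        = (0 * pvBASE + (c.toNat : Int)) * pvBASE ^ cs.length + pvEnc cs := ih _
    rw [List.foldl_cons, ih, List.length_cons, hc]; ring

theorem pvEnc_cons (c : Char) (cs : List Char) :
    pvEnc (c :: cs) = (c.toNat : Int) * pvBASE ^ cs.length + pvEnc cs := by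
  simp only [pvEnc, List.foldl_cons]
  rw [show ((0:Int) * pvBASE + (c.toNat : Int)) = (c.toNat : Int) by ring]
  exact pvEnc_foldl cs _

theorem pvEnc_snoc (cs : List Char) (c : Char) :
    pvEnc (cs ++ [c]) = pvEnc cs * pvBASE + (c.toNat : Int) := by
  simp [pvEnc, List.foldl_append]

-- the rolling update takes the exact code of window i to the exact code of window i+1
theorem pvRoll (s : List Char) (Ln i : Nat) (h : i + 1 + Ln ≤ s.length) :
    pvEnc (pvWin s Ln i) * pvBASE + ((s.getD (i + Ln) 'A').toNat : Int)
      - ((s.getD i 'A').toNat : Int) * pvBASE ^ Ln = pvEnc (pvWin s Ln (i + 1)) := by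
  cases Ln with
  | zero =>
    simp [pvWin, pvEnc]
  | succ k =>
    have hi : i < s.length := by omega
    have hik : i + 1 + k < s.length := by omega
    have hwin_i : pvWin s (k+1) i = s[i] :: ((s.drop (i+1)).take k) := by
      unfold pvWin
      rw [List.drop_eq_getElem_cons hi, List.take_succ_cons]
    have hmid_len : ((s.drop (i+1)).take k).length = k := by simp; omega
    have hwin_i1 : pvWin s (k+1) (i+1) = ((s.drop (i+1)).take k) ++ [s[i + 1 + k]] := by
      unfold pvWin
      rw [List.take_add_one]
      congr 1
      rw [List.getElem?_drop]
      simp [List.getElem?_eq_getElem hik]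
    rw [hwin_i, hwin_i1, pvEnc_cons, pvEnc_snoc, hmid_len,
        List.getD_eq_getElem s 'A' hi,
        List.getD_eq_getElem s 'A' (show i + (k+1) < s.length by omega)]
    have : s[i + (k+1)] = s[i + 1 + k] := by congr 1; omega
    rw [this]
    ring

-- and hence this rolling update takes the hash of window i to the hash of window i+1
theorem pvHshRoll (s : List Char) (Ln i : Nat) (h : i + 1 + Ln ≤ s.length) :
    (pvHsh s Ln i * pvBASE + ((s.getD (i + Ln) 'A').toNat : Int)
      - ((s.getD i 'A').toNat : Int) * (pvBASE ^ Ln % pvMOD)) % pvMOD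
      = pvHsh s Ln (i + 1) := by
  unfold pvHsh
  have m1 : pvEnc (pvWin s Ln i) % pvMOD ≡ pvEnc (pvWin s Ln i) [ZMOD pvMOD] :=
    Int.emod_emod_of_dvd _ dvd_rfl
  have m2 : (pvBASE ^ Ln % pvMOD) ≡ pvBASE ^ Ln [ZMOD pvMOD] :=
    Int.emod_emod_of_dvd _ dvd_rfl
  have m3 := ((m1.mul_right pvBASE).add_right ((s.getD (i + Ln) 'A').toNat : Int)).sub
    (m2.mul_left ((s.getD i 'A').toNat : Int))
  calc (pvEnc (pvWin s Ln i) % pvMOD * pvBASE + ((s.getD (i + Ln) 'A').toNat : Int)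
        - ((s.getD i 'A').toNat : Int) * (pvBASE ^ Ln % pvMOD)) % pvMOD
      = (pvEnc (pvWin s Ln i) * pvBASE + ((s.getD (i + Ln) 'A').toNat : Int)
        - ((s.getD i 'A').toNat : Int) * pvBASE ^ Ln) % pvMOD := m3
    _ = pvEnc (pvWin s Ln (i + 1)) % pvMOD := by rw [pvRoll s Ln i h]

-- the reduced initial fold computes the exact code mod pvMOD
theorem pvFoldMod (cs : List Char) (b : Int) :
    cs.foldl (fun a c => (a * pvBASE + (c.toNat : Int)) % pvMOD) (b % pvMOD)
      = (cs.foldl (fun a c => a * pvBASE + (c.toNat : Int)) b) % pvMOD := by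
  induction cs generalizing b with
  | nil => rfl
  | cons c cs ih =>
    simp only [List.foldl_cons]
    rw [show ((b % pvMOD * pvBASE + (c.toNat : Int)) % pvMOD)
          = (b * pvBASE + (c.toNat : Int)) % pvMOD from
        ((show (b % pvMOD) ≡ b [ZMOD pvMOD] from Int.emod_emod_of_dvd b dvd_rfl).mul_right
          pvBASE).add_right _,
      ih]

theorem pvFoldMod0 (cs : List Char) :
    cs.foldl (fun a c => (a * pvBASE + (c.toNat : Int)) % pvMOD) 0 = pvEnc cs % pvMOD := by
  have := pvFoldMod cs 0
  rwa [Int.zero_emod] at this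

-- equal windows have equal hashes
theorem pvHsh_congr (s : List Char) (Ln j i : Nat) (h : pvWin s Ln j = pvWin s Ln i) :
    pvHsh s Ln j = pvHsh s Ln i := by unfold pvHsh; rw [h]

-- one bucket-recording step
theorem pvIdx_succ (s : List Char) (Ln i : Nat) (x : Int) :
    pvIdx s Ln (i + 1) x
      = pvIdx s Ln i x ++ (if pvHsh s Ln i = x then [(i : Int)] else []) := by
  unfold pvIdx
  rw [List.range_succ, List.filter_append, List.map_append]
  congr 1
  by_cases hx : pvHsh s Ln i = x
  · simp [hx]
  · simp [hx]

-- the two loops agree under the loop invariants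
theorem pvLoops_eq (s : List Char) (Ln : Nat) (hLn : Ln ≤ s.length) :
    ∀ (cnt i : Nat) (seenA : PySem.Set (List Char)) (buckets : PySem.Dict Int (List Int))
      (h : Int),
      cnt + i = s.length - Ln + 1 →
      (∀ w, w ∈ seenA ↔ ∃ j, j < i ∧ pvWin s Ln j = w) →
      (∀ x, PySem.Dict.getD buckets x [] = pvIdx s Ln i x) →
      (0 < cnt → h = pvHsh s Ln i) →
      checkALoop s (Ln : Int) seenA i cnt
        = checkBLoop s (Ln : Int) (pvBASE ^ Ln % pvMOD) buckets h i cnt := by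
  intro cnt
  induction cnt with
  | zero => intro i seenA buckets h _ _ _ _; rfl
  | succ c ih =>
    intro i seenA buckets h hcnt hA hBk hh
    have hi : i + Ln ≤ s.length := by omega
    have hh' : h = pvHsh s Ln i := hh (Nat.succ_pos c)
    have hslice : ∀ j : Nat, PySem.List.slice s (some (j : Int)) (some ((j : Int) + (Ln : Int)))
        = pvWin s Ln j := fun j => PySem.List.slice_natCast_add s j Ln
    -- the two tests are equivalent
    have hmem : (pvWin s Ln i ∈ seenA)
        ↔ ((PySem.Dict.getD buckets h []).any (fun j =>
            PySem.List.slice s (some j) (some (j + (Ln : Int)))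
              == pvWin s Ln i) = true) := by
      rw [hA, hBk, hh', List.any_eq_true]
      constructor
      · rintro ⟨j, hj, hw⟩
        refine ⟨Int.ofNat j, ?_, ?_⟩
        · unfold pvIdx
          simp only [List.mem_map, List.mem_filter, List.mem_range]
          exact ⟨j, ⟨hj, by simp [pvHsh_congr s Ln j i hw]⟩, rfl⟩
        · have : (Int.ofNat j) = ((j : Nat) : Int) := rfl
          rw [this, hslice j, hw]
          simp
      · rintro ⟨jz, hjz, heq⟩
        unfold pvIdx at hjz
        simp only [List.mem_map, List.mem_filter, List.mem_range] at hjz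
        obtain ⟨j, ⟨hj, _⟩, rfl⟩ := hjz
        rw [show (Int.ofNat j) = ((j : Nat) : Int) from rfl, hslice j] at heq
        exact ⟨j, hj, by simpa using heq⟩
    rw [checkALoop, checkBLoop]
    simp only [hslice i]
    by_cases hin : pvWin s Ln i ∈ seenA
    · rw [if_pos ((PySem.Set.contains_iff seenA _).mpr hin), if_pos (hmem.mp hin)]
    · rw [if_neg (fun hc' => hin ((PySem.Set.contains_iff seenA _).mp hc')),
          if_neg (fun hc' => (hmem.not.mp hin) hc')]
      apply ih (i + 1)
      · omega
      · intro w
        rw [PySem.Set.mem_add, hA]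
        constructor
        · rintro (⟨j, hj, hw⟩ | hw)
          · exact ⟨j, by omega, hw⟩
          · exact ⟨i, by omega, hw.symm⟩
        · rintro ⟨j, hj, hw⟩
          by_cases hji : j = i
          · exact Or.inr (by rw [← hw, hji])
          · exact Or.inl ⟨j, by omega, hw⟩
      · intro x
        rw [PySem.Dict.getD_insert, hBk, pvIdx_succ, hBk, hh']
        by_cases hx : x = pvHsh s Ln i
        · rw [if_pos hx, if_pos hx.symm, hx]
        · rw [if_neg hx, if_neg (fun hc' => hx hc'.symm), List.append_nil]
      · intro hc'
        rw [if_pos hc', hh']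
        have hrange : i + 1 + Ln ≤ s.length := by omega
        have hga : PySem.List.pyGetD s ((i : Int) + (Ln : Int)) 'A' = s.getD (i + Ln) 'A' := by
          rw [show ((i : Int) + (Ln : Int)) = ((i + Ln : Nat) : Int) by push_cast; ring]
          exact PySem.List.pyGetD_natCast s (i + Ln) 'A'
        have hgb : PySem.List.pyGetD s (i : Int) 'A' = s.getD i 'A' :=
          PySem.List.pyGetD_natCast s i 'A'
        rw [PySem.Int.mod_eq_emod_of_pos pvMOD_pos, hga, hgb]
        exact pvHshRoll s Ln i hrange

-- ===== VERDICT (by name: the statement is the Claim_ definition above) =====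
theorem check_py_spec : Claim_equal_check_py := by
  intro S L _hdom hpre
  unfold Spec_check_py check_py check_py_alt
  show checkALoop S.toList L PySem.Set.empty 0 (((S.toList.length : Int) - L + 1).toNat)
      = if ((S.toList.length : Int) - L + 1) ≤ 0 then (-1 : Int)
        else checkBLoop S.toList L (PySem.Int.powMod pvBASE L.toNat pvMOD) PySem.Dict.empty
          ((PySem.List.slice S.toList none (some L)).foldl
            (fun a c => PySem.Int.mod (a * pvBASE + (c.toNat : Int)) pvMOD) 0) 0
          ((S.toList.length : Int) - L + 1).toNat
  obtain ⟨Ln, rfl⟩ : ∃ Ln : Nat, L = (Ln : Int) := ⟨L.toNat, (Int.toNat_of_nonneg hpre).symm⟩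
  simp only [Int.toNat_natCast]
  generalize S.toList = s
  by_cases hm : (s.length : Int) - (Ln : Int) + 1 ≤ 0
  · -- no windows: A's fuel is 0, B returns -1 at the guard
    rw [if_pos hm, show ((s.length : Int) - (Ln : Int) + 1).toNat = 0 by omega]
    rfl
  · rw [if_neg hm]
    have hLle : Ln ≤ s.length := by omega
    rw [show ((s.length : Int) - (Ln : Int) + 1).toNat = s.length - Ln + 1 by omega,
        PySem.List.slice_to_natCast s Ln,
        PySem.Int.powMod_eq_emod pvBASE Ln pvMOD_pos]
    have hh0 : (s.take Ln).foldl
        (fun a c => PySem.Int.mod (a * pvBASE + (c.toNat : Int)) pvMOD) 0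
        = pvHsh s Ln 0 := by
      simp only [PySem.Int.mod_eq_emod_of_pos pvMOD_pos]
      rw [pvFoldMod0]
      simp [pvHsh, pvEnc, pvWin]
    rw [hh0]
    apply pvLoops_eq s Ln hLle (s.length - Ln + 1) 0 PySem.Set.empty PySem.Dict.empty
    · rfl
    · intro w; simp [PySem.Set.empty]
    · intro x; simp [PySem.Dict.empty, PySem.Dict.getD, PySem.Dict.get?, pvIdx]
    · intro _; rfl
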